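-- pv_equiv track=rewrite | github.com/ny-11/osero | リバーシ仮.py | hantei_sita
-- ===== SOURCE A (Python) =====
-- def hantei_sita(y,x,lst,turn,flag):
--     if lst[y][x] == ' ':
--         count = 1
--         if turn == 1:
--             y += 1
--             if lst[y][x] == 'X':
--                 hamideru = 0
--                 while hamideru == 0:
--                     count += 1
--                     y += 1
--                     if lst[y][x] == 'O' or lst[y][x] == 'X':
--                         if lst[y][x] == 'O':
--                             while count > 0:
--                                 lst[y][x] = 'O'
--                                 count -= 1
--                                 hamideru = 1
--                                 y -= 1
--                                 flag = 1
--                     else: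
--                         hamideru = 1
--
--         else:
--             y += 1
--             if lst[y][x] == 'O':
--                 hamideru = 0
--                 while hamideru == 0:
--                     y += 1
--                     count += 1
--                     if lst[y][x] == 'O' or lst[y][x] == 'X':
--                         if lst[y][x] == 'X':
--                             while count > 0:
--                                 lst[y][x] = 'X'
--                                 hamideru = 1
--                                 count -= 1
--                                 y -= 1
--                                 flag = 1
--                     else:
--                         hamideru = 1
--     return lst,flag
-- ===== SOURCE B (Python) =====
-- def _flip_down(lst, i, x, me, opp):
--     # Recursively search down for a `me` anchor; flip each opp cell on the unwind.
--     c = lst[i][x]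
--     if c == opp:
--         ok = _flip_down(lst, i + 1, x, me, opp)
--         if ok:
--             lst[i][x] = me
--         return ok
--     return c == me
--
-- def hantei_sita(y, x, lst, turn, flag):
--     # Like A, mutates lst's rows in place; the equivalence claim is about the returned value.
--     me, opp = ('O', 'X') if turn == 1 else ('X', 'O')
--     if lst[y][x] == ' ' and lst[y + 1][x] == opp:
--         if _flip_down(lst, y + 1, x, me, opp):
--             flag = 1
--     return lst, flag
-- ===== Notes on version B (the rewrite author's own statement) =====
-- stated objective: simpler
-- what changed: Replaces A's iterative counter-driven scan followed by a separate walk-back write loop (duplicated per turn) with a single recursive pass: recurse down the column and flip each opponent cell on the unwind only when the recursion found the player's anchor.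
import Mathlib
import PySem

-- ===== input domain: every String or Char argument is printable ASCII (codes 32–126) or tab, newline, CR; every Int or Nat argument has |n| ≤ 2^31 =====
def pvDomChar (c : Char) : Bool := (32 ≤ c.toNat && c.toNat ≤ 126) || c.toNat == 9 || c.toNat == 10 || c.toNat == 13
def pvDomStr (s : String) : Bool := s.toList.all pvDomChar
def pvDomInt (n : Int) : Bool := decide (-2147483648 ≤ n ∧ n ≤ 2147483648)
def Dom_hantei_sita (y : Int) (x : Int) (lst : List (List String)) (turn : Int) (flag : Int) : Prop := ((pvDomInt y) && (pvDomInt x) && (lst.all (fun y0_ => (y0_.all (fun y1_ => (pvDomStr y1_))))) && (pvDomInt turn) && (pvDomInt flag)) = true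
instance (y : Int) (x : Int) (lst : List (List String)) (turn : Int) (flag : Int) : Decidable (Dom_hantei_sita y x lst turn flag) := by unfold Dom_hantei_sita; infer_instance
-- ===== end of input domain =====

-- B replaces A's iterative counter scan + separate walk-back write loop (duplicated per turn)
-- by one recursive pass that flips each opponent cell on the unwind once the anchor is found;
-- same cost, simpler decomposition.  Both Pythons mutate lst's rows in place identically; the
-- equivalence proved here is about the returned value.


-- Shared primitives: Python's `lst[j][x]` read and `lst[j][x] = v` write (negative indices wrap).
def cellAt (lst : List (List String)) (j x : Int) : Option String :=
  (PySem.List.pyGet? lst j).bind fun row => PySem.List.pyGet? row x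

def setCell (lst : List (List String)) (j x : Int) (v : String) : List (List String) :=
  PySem.List.pySetD lst j (PySem.List.pySetD (PySem.List.pyGetD lst j []) x v)

-- ===== PORT A =====
-- A's inner `while count > 0` loop: write `me` at yy, yy-1, … (count times); it also sets
-- hamideru = 1 and flag = 1, which the caller `loopA` accounts for by returning flag 1.
def flipUpA (x : Int) (me : String) : Nat → Int → List (List String) → List (List String)
  | 0, _, lst => lst
  | n + 1, yy, lst => flipUpA x me n (yy - 1) (setCell lst yy x me)

-- A's outer `while hamideru == 0` loop, parameterised by (me,opp) since A's two turn branches are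
-- the same statements with 'O'/'X' swapped (their statement order inside an iteration differs but
-- the per-iteration state change is identical).  fuel only bounds the iterations; a none read
-- (Python IndexError, excluded by Pre_) exits with the current state.
def loopA (x : Int) (me opp : String) : Nat → Int → Int → List (List String) → Int → List (List String) × Int
  | 0, _, _, lst, flag => (lst, flag)
  | fuel + 1, count, yy, lst, flag =>
    let count := count + 1
    let yy := yy + 1
    match cellAt lst yy x with
    | some c =>
      if c = me ∨ c = opp then
        if c = me then (flipUpA x me count.toNat yy lst, 1)
        else loopA x me opp fuel count yy lst flag
      else (lst, flag)
    | none => (lst, flag)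

def hantei_sita (y : Int) (x : Int) (lst : List (List String)) (turn : Int) (flag : Int) : List (List String) × Int :=
  match cellAt lst y x with
  | some c =>
    if c = " " then
      if turn = 1 then
        match cellAt lst (y + 1) x with
        | some c1 => if c1 = "X" then loopA x "O" "X" (2 * lst.length + 2) 1 (y + 1) lst flag else (lst, flag)
        | none => (lst, flag)
      else
        match cellAt lst (y + 1) x with
        | some c1 => if c1 = "O" then loopA x "X" "O" (2 * lst.length + 2) 1 (y + 1) lst flag else (lst, flag)
        | none => (lst, flag)
    else (lst, flag)
  | none => (lst, flag)

-- ===== PORT B =====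
-- B's recursive `_flip_down`: search down for the `me` anchor, flip each opp cell on the unwind.
-- The Bool is the Python return value, the list is the (threaded) mutated board; a none read
-- (Python IndexError, excluded by Pre_) and fuel exhaustion exit with (false, board unchanged).
def flipDownB (x : Int) (me opp : String) : Nat → Int → List (List String) → Bool × List (List String)
  | 0, _, lst => (false, lst)
  | fuel + 1, i, lst =>
    match cellAt lst i x with
    | none => (false, lst)
    | some c =>
      if c = opp then
        let r := flipDownB x me opp fuel (i + 1) lst
        if r.1 then (true, setCell r.2 i x me) else (false, r.2)
      else (c = me, lst)

def hantei_sita_alt (y : Int) (x : Int) (lst : List (List String)) (turn : Int) (flag : Int) : List (List String) × Int :=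
  let me := if turn = 1 then "O" else "X"
  let opp := if turn = 1 then "X" else "O"
  match cellAt lst y x, cellAt lst (y + 1) x with
  | some c, some c1 =>
    if c = " " ∧ c1 = opp then
      let r := flipDownB x me opp (2 * lst.length + 2) (y + 1) lst
      if r.1 then (r.2, 1) else (r.2, flag)
    else (lst, flag)
  | some c, none => if c = " " then (lst, flag) else (lst, flag)
  | none, _ => (lst, flag)

-- ===== PRECONDITION & SPEC =====
-- Pre_ excludes exactly the inputs where the Python A raises IndexError: an out-of-range read of
-- the placed cell or the cell below it, or a downward run of opponent cells that walks off the board.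
def Pre_hantei_sita (y : Int) (x : Int) (lst : List (List String)) (turn : Int) (flag : Int) : Prop :=
  (cellAt lst y x).isSome ∧
  (cellAt lst y x = some " " →
    (cellAt lst (y + 1) x).isSome ∧
    (cellAt lst (y + 1) x = some (if turn = 1 then "X" else "O") →
      ∃ k ≤ 2 * lst.length,
        (∀ m : Nat, m ≤ k → (cellAt lst (y + 1 + (m : Int)) x).isSome) ∧
        (∀ m : Nat, m < k → cellAt lst (y + 1 + (m : Int)) x = some (if turn = 1 then "X" else "O")) ∧
        cellAt lst (y + 1 + (k : Int)) x ≠ some (if turn = 1 then "X" else "O")))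

instance (y : Int) (x : Int) (lst : List (List String)) (turn : Int) (flag : Int) : Decidable (Pre_hantei_sita y x lst turn flag) := by unfold Pre_hantei_sita; infer_instance

def pvWitness_hantei_sita : Int × Int × List (List String) × Int × Int := (0, 0, [[" "], ["X"], ["O"]], 1, 0)

def Spec_hantei_sita (y : Int) (x : Int) (lst : List (List String)) (turn : Int) (flag : Int) (out : List (List String) × Int) : Prop := out = hantei_sita_alt y x lst turn flag
instance (y : Int) (x : Int) (lst : List (List String)) (turn : Int) (flag : Int) (out : List (List String) × Int) : Decidable (Spec_hantei_sita y x lst turn flag out) := by unfold Spec_hantei_sita; infer_instance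

-- ===== CLAIM (what is proved, stated in full; the proofs are below) =====
def Claim_equal_hantei_sita : Prop := ∀ (y : Int) (x : Int) (lst : List (List String)) (turn : Int) (flag : Int), Dom_hantei_sita y x lst turn flag → Pre_hantei_sita y x lst turn flag → Spec_hantei_sita y x lst turn flag (hantei_sita y x lst turn flag)

-- ===== LEMMAS AND PROOFS =====

-- Proof-only helper: folding `setCell … x me` over a list of row indices; both ports' write
-- phases are reduced to flipB over explicit index lists.
def flipB (lst : List (List String)) (x : Int) (me : String) (idxs : List Int) : List (List String) :=
  idxs.foldl (fun L j => setCell L j x me) lst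

theorem pyIdx?_lt {n : Nat} {i : Int} {k : Nat} (h : PySem.List.pyIdx? n i = some k) : k < n := by
  unfold PySem.List.pyIdx? at h
  split_ifs at h <;> simp_all <;> omega

theorem length_setCell (lst : List (List String)) (j x : Int) (v : String) :
    (setCell lst j x v).length = lst.length := by
  unfold setCell; exact PySem.List.length_pySetD ..

theorem setCell_eq (lst : List (List String)) (j x : Int) (v : String) :
    setCell lst j x v =
      match PySem.List.pyIdx? lst.length j with
      | none => lst
      | some jn => lst.set jn (PySem.List.pySetD ((lst[jn]?).getD []) x v) := by
  unfold setCell PySem.List.pySetD PySem.List.pySet? PySem.List.pyGetD PySem.List.pyGet?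
  cases h : PySem.List.pyIdx? lst.length j <;> simp [h]

theorem pySetD_idem (r : List String) (x : Int) (v : String) :
    PySem.List.pySetD (PySem.List.pySetD r x v) x v = PySem.List.pySetD r x v := by
  unfold PySem.List.pySetD PySem.List.pySet?
  cases h : PySem.List.pyIdx? r.length x <;> simp [h, List.set_set]

theorem setCell_comm (lst : List (List String)) (a b x : Int) (v : String) :
    setCell (setCell lst a x v) b x v = setCell (setCell lst b x v) a x v := by
  cases hpa : PySem.List.pyIdx? lst.length a with
  | none =>
    have ea : ∀ L : List (List String), L.length = lst.length → setCell L a x v = L := by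
      intro L hL; rw [setCell_eq, hL, hpa]
    rw [ea lst rfl, ea _ (length_setCell ..)]
  | some an =>
    cases hpb : PySem.List.pyIdx? lst.length b with
    | none =>
      have eb : ∀ L : List (List String), L.length = lst.length → setCell L b x v = L := by
        intro L hL; rw [setCell_eq, hL, hpb]
      rw [eb lst rfl, eb _ (length_setCell ..)]
    | some bn =>
      have han : an < lst.length := pyIdx?_lt hpa
      have hbn : bn < lst.length := pyIdx?_lt hpb
      rw [setCell_eq lst a, hpa, setCell_eq lst b, hpb,
          setCell_eq _ b, List.length_set, hpb, setCell_eq _ a, List.length_set, hpa]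
      by_cases hab : an = bn
      · subst hab
        simp [han, List.set_set, pySetD_idem]
      · simp only [List.getElem?_set_ne hab, List.getElem?_set_ne (Ne.symm hab)]
        exact (List.set_comm _ _ (Ne.symm hab)).symm

theorem flipB_nil (lst : List (List String)) (x : Int) (me : String) : flipB lst x me [] = lst := rfl

theorem flipB_cons (lst : List (List String)) (x : Int) (me : String) (a : Int) (l : List Int) :
    flipB lst x me (a :: l) = flipB (setCell lst a x me) x me l := rfl

theorem flipB_append (lst : List (List String)) (x : Int) (me : String) (l1 l2 : List Int) :
    flipB lst x me (l1 ++ l2) = flipB (flipB lst x me l1) x me l2 := List.foldl_append ..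

theorem flipB_push (lst : List (List String)) (x : Int) (me : String) (l : List Int) (a : Int) :
    flipB (setCell lst a x me) x me l = setCell (flipB lst x me l) a x me := by
  induction l generalizing lst with
  | nil => rfl
  | cons b l ih => rw [flipB_cons, flipB_cons, setCell_comm, ih, ← flipB_cons]

theorem flipB_reverse (lst : List (List String)) (x : Int) (me : String) (l : List Int) :
    flipB lst x me l.reverse = flipB lst x me l := by
  induction l generalizing lst with
  | nil => rfl
  | cons a l ih =>
    rw [List.reverse_cons, flipB_append, ih, flipB_cons, flipB_nil, ← flipB_push, ← flipB_cons]

theorem flipUpA_eq_flipB (x : Int) (me : String) :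
    ∀ (n : Nat) (j : Int) (lst : List (List String)),
      flipUpA x me n j lst = flipB lst x me ((List.range n).map (fun (m : Nat) => j - (m : Int))) := by
  intro n
  induction n with
  | zero => intro j lst; rfl
  | succ n ih =>
    intro j lst
    rw [flipUpA, ih, List.range_succ_eq_map, List.map_cons, List.map_map]
    simp only [Nat.cast_zero, sub_zero, flipB, List.foldl_cons]
    congr 1
    apply List.map_congr_left
    intro m _
    simp only [Function.comp_apply]
    push_cast
    ring

theorem desc_eq_rev_asc : ∀ (n : Nat) (c : Int),
    (List.range n).map (fun (m : Nat) => c + (n : Int) - 1 - (m : Int)) =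
      ((List.range n).map (fun (m : Nat) => c + (m : Int))).reverse := by
  intro n
  induction n with
  | zero => intro c; rfl
  | succ n ih =>
    intro c
    conv_lhs => rw [List.range_succ]
    conv_rhs => rw [List.range_succ_eq_map]
    simp only [List.map_append, List.map_cons, List.map_nil, List.map_map, List.reverse_cons]
    congr 1
    · have h1 : (List.range n).map (fun (m : Nat) => c + ((n + 1 : Nat) : Int) - 1 - (m : Int))
          = (List.range n).map (fun (m : Nat) => (c + 1) + (n : Int) - 1 - (m : Int)) :=
        List.map_congr_left (fun m _ => by push_cast; ring)
      have h2 : (List.range n).map ((fun (m : Nat) => c + (m : Int)) ∘ Nat.succ)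
          = (List.range n).map (fun (m : Nat) => (c + 1) + (m : Int)) :=
        List.map_congr_left (fun m _ => by simp only [Function.comp_apply]; push_cast; ring)
      rw [h1, h2, ih]
    · simp only [List.cons.injEq, and_true]
      push_cast
      ring

-- A write with the value the cell already holds is a no-op.
theorem pyGet?_bind {α : Type} (xs : List α) (i : Int) :
    PySem.List.pyGet? xs i = (PySem.List.pyIdx? xs.length i).bind (fun k => xs[k]?) := by
  unfold PySem.List.pyGet?
  cases h : PySem.List.pyIdx? xs.length i <;> simp [h]

theorem pySetD_eq {α : Type} (xs : List α) (i : Int) (v : α) :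
    PySem.List.pySetD xs i v =
      match PySem.List.pyIdx? xs.length i with
      | none => xs
      | some k => xs.set k v := by
  unfold PySem.List.pySetD PySem.List.pySet?
  cases h : PySem.List.pyIdx? xs.length i <;> simp [h]

theorem setCell_self (lst : List (List String)) (j x : Int) (v : String)
    (h : cellAt lst j x = some v) : setCell lst j x v = lst := by
  unfold cellAt at h
  rw [setCell_eq]
  rw [pyGet?_bind] at h
  cases hj : PySem.List.pyIdx? lst.length j with
  | none => rfl
  | some jn =>
    rw [hj] at h
    have hjl : jn < lst.length := pyIdx?_lt hj
    simp only [List.getElem?_eq_getElem hjl, Option.getD_some, Option.bind_some] at h ⊢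
    rw [pyGet?_bind] at h
    rw [pySetD_eq]
    cases hx : PySem.List.pyIdx? (lst[jn]).length x with
    | none => simp [List.set_getElem_self]
    | some xn =>
      rw [hx] at h
      have hxl : xn < (lst[jn]).length := pyIdx?_lt hx
      simp only [List.getElem?_eq_getElem hxl, Option.bind_some] at h
      injection h with h
      subst h
      simp only [List.set_getElem_self]

-- Reading (same column x) after a write: either unchanged or the written value.
theorem cellAt_setCell_or (lst : List (List String)) (j j' x : Int) (v : String) :
    cellAt (setCell lst j x v) j' x = cellAt lst j' x ∨
    cellAt (setCell lst j x v) j' x = some v := by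
  rw [setCell_eq]
  cases hj : PySem.List.pyIdx? lst.length j with
  | none => exact Or.inl rfl
  | some jn =>
    have hjl : jn < lst.length := pyIdx?_lt hj
    unfold cellAt
    rw [pyGet?_bind, pyGet?_bind lst, List.length_set]
    cases hj' : PySem.List.pyIdx? lst.length j' with
    | none => exact Or.inl rfl
    | some jn' =>
      simp only [Option.bind_some]
      by_cases hne : jn' = jn
      · subst hne
        simp only [List.getElem?_set_self hjl, Option.getD_some, Option.bind_some,
          List.getElem?_eq_getElem hjl]
        rw [pySetD_eq, pyGet?_bind, pyGet?_bind]
        cases hx : PySem.List.pyIdx? (lst[jn']).length x with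
        | none => rw [hx]; exact Or.inl rfl
        | some xn =>
          have hxl : xn < (lst[jn']).length := pyIdx?_lt hx
          simp only [List.length_set, hx, Option.bind_some]
          simp [List.getElem?_set_self hxl]
      · simp [List.getElem?_set_ne (Ne.symm hne)]

theorem cellAt_flipB_or (x : Int) (me : String) (l : List Int) :
    ∀ (lst : List (List String)) (j : Int),
      cellAt (flipB lst x me l) j x = cellAt lst j x ∨
      cellAt (flipB lst x me l) j x = some me := by
  induction l with
  | nil => intro lst j; exact Or.inl rfl
  | cons a l ih =>
    intro lst j
    rw [flipB_cons]
    rcases ih (setCell lst a x me) j with h | h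
    · rw [h]; exact cellAt_setCell_or lst a j x me
    · exact Or.inr h

-- B's recursion on a terminated run: succeeds iff the stop cell is `me`, and then the result is
-- the ascending flip of the run (flipping on the unwind applies the writes bottom-up, which
-- commutes since all writes carry the same value).
theorem flipDownB_eq (x : Int) (me opp : String) (hme : me ≠ opp) (lst : List (List String)) :
    ∀ (k fuel : Nat) (i : Int),
      k + 1 ≤ fuel →
      (∀ m : Nat, m < k → cellAt lst (i + (m : Int)) x = some opp) →
      cellAt lst (i + (k : Int)) x ≠ some opp →
      flipDownB x me opp fuel i lst =
        (if cellAt lst (i + (k : Int)) x = some me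
         then (true, flipB lst x me ((List.range k).map (fun (m : Nat) => i + (m : Int))))
         else (false, lst)) := by
  intro k
  induction k with
  | zero =>
    intro fuel i hfuel _ hstop
    obtain ⟨f, rfl⟩ : ∃ f, fuel = f + 1 := ⟨fuel - 1, by omega⟩
    rw [flipDownB]
    simp only [Nat.cast_zero, add_zero] at hstop ⊢
    cases hc : cellAt lst i x with
    | none => simp [hc]
    | some c =>
      have hco : ¬ c = opp := fun h => hstop (h ▸ hc)
      simp only [hc, if_neg hco]
      by_cases hcm : c = me
      · subst hcm
        simp [flipB]
      · simp [hcm]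
  | succ k ih =>
    intro fuel i hfuel hopp hstop
    obtain ⟨f, rfl⟩ : ∃ f, fuel = f + 1 := ⟨fuel - 1, by omega⟩
    rw [flipDownB]
    have h0 : cellAt lst i x = some opp := by
      have := hopp 0 (by omega); simpa using this
    rw [h0]
    simp only [if_pos rfl]
    rw [ih f (i + 1) (by omega)
        (fun m hm => by
          have := hopp (m + 1) (by omega)
          rw [← this]; congr 1; push_cast; ring)
        (by
          rw [show i + 1 + (k : Int) = i + ((k + 1 : Nat) : Int) by push_cast; ring]
          exact hstop)]
    have hidx : i + 1 + (k : Int) = i + ((k + 1 : Nat) : Int) := by push_cast; ring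
    rw [hidx]
    by_cases hfin : cellAt lst (i + ((k + 1 : Nat) : Int)) x = some me
    · rw [if_pos hfin, if_pos hfin]
      have hl : setCell (flipB lst x me ((List.range k).map (fun (m : Nat) => i + 1 + (m : Int)))) i x me
          = flipB lst x me ((List.range (k + 1)).map (fun (m : Nat) => i + (m : Int))) := by
        rw [← flipB_push, ← flipB_cons, List.range_succ_eq_map, List.map_cons, List.map_map]
        congr 2
        · simp
        · exact List.map_congr_left (fun m _ => by simp only [Function.comp_apply]; push_cast; ring)
      simp [hl]
    · rw [if_neg hfin, if_neg hfin]
      simp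

-- (unchanged from the A side) A's outer loop on a terminated run.
theorem loopA_eq (x : Int) (me opp : String) (hme : me ≠ opp) (lst : List (List String)) :
    ∀ (k fuel : Nat) (count j0 flag : Int),
      k + 1 ≤ fuel → 0 ≤ count →
      (∀ m : Nat, m < k → cellAt lst (j0 + 1 + (m : Int)) x = some opp) →
      cellAt lst (j0 + 1 + (k : Int)) x ≠ some opp →
      loopA x me opp fuel count j0 lst flag =
        (if cellAt lst (j0 + 1 + (k : Int)) x = some me
         then (flipUpA x me (count.toNat + k + 1) (j0 + 1 + (k : Int)) lst, 1)
         else (lst, flag)) := by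
  intro k
  induction k with
  | zero =>
    intro fuel count j0 flag hfuel hcount _ hstop
    obtain ⟨f, rfl⟩ : ∃ f, fuel = f + 1 := ⟨fuel - 1, by omega⟩
    rw [loopA]
    simp only [Nat.cast_zero, add_zero] at hstop ⊢
    split
    · rename_i c hc
      have hco : ¬ c = opp := fun h => hstop (h ▸ hc)
      by_cases hcm : c = me
      · subst hcm
        rw [if_pos (Or.inl rfl), if_pos rfl, hc, if_pos rfl]
        have : (count + 1).toNat = count.toNat + 1 := by omega
        rw [this]
      · rw [if_neg (by rintro (h | h) <;> [exact hcm h; exact hco h]), hc,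
            if_neg (fun h => hcm (by injection h))]
    · rename_i hc
      simp [hc]
  | succ k ih =>
    intro fuel count j0 flag hfuel hcount hopp hstop
    obtain ⟨f, rfl⟩ : ∃ f, fuel = f + 1 := ⟨fuel - 1, by omega⟩
    rw [loopA]
    have h0 : cellAt lst (j0 + 1) x = some opp := by
      have := hopp 0 (by omega); simpa using this
    split
    · rename_i c hc
      rw [h0] at hc
      injection hc with hc
      subst hc
      rw [if_pos (Or.inr rfl), if_neg (fun h => hme h.symm)]
      rw [ih f (count + 1) (j0 + 1) flag (by omega) (by omega)
          (fun m hm => by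
            have := hopp (m + 1) (by omega)
            rw [← this]; congr 1; push_cast; ring)
          (by
            rw [show j0 + 1 + 1 + (k : Int) = j0 + 1 + ((k + 1 : Nat) : Int) by push_cast; ring]
            exact hstop)]
      have hidx : j0 + 1 + 1 + (k : Int) = j0 + 1 + ((k + 1 : Nat) : Int) := by push_cast; ring
      have hcnt : (count + 1).toNat + k + 1 = count.toNat + (k + 1) + 1 := by omega
      rw [hidx, hcnt]
    · rename_i hc
      rw [h0] at hc
      simp at hc

-- The core bridge: on a terminated run, A's loop and B's recursion return the same pair.
-- A also rewrites the anchor cell with its own value; setCell_self/cellAt_flipB_or show that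
-- extra write is a no-op.
theorem branch_eq (x y flag : Int) (lst : List (List String)) (me opp : String)
    (hme : me ≠ opp) (hc1 : cellAt lst (y + 1) x = some opp)
    (h4 : ∃ k ≤ 2 * lst.length,
        (∀ m : Nat, m ≤ k → (cellAt lst (y + 1 + (m : Int)) x).isSome) ∧
        (∀ m : Nat, m < k → cellAt lst (y + 1 + (m : Int)) x = some opp) ∧
        cellAt lst (y + 1 + (k : Int)) x ≠ some opp) :
    loopA x me opp (2 * lst.length + 2) 1 (y + 1) lst flag
    = (let r := flipDownB x me opp (2 * lst.length + 2) (y + 1) lst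
       if r.1 then (r.2, 1) else (r.2, flag)) := by
  obtain ⟨k0, hk0, hsome, hopp, hstop⟩ := h4
  have hk1 : 1 ≤ k0 := by
    rcases Nat.eq_zero_or_pos k0 with h | h
    · exfalso; apply hstop; rw [h]; simpa using hc1
    · exact h
  have hcast : y + 1 + 1 + ((k0 - 1 : Nat) : Int) = y + 1 + (k0 : Int) := by
    have : ((k0 - 1 : Nat) : Int) = (k0 : Int) - 1 := by omega
    rw [this]; ring
  have hA := loopA_eq x me opp hme lst (k0 - 1) (2 * lst.length + 2) 1 (y + 1) flag
    (by omega) (by norm_num)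
    (fun m hm => by
      have := hopp (m + 1) (by omega)
      rw [← this]; congr 1; push_cast; ring)
    (by rw [hcast]; exact hstop)
  have hB := flipDownB_eq x me opp hme lst k0 (2 * lst.length + 2) (y + 1) (by omega) hopp hstop
  rw [hA, hB]
  rw [hcast]
  by_cases hfin : cellAt lst (y + 1 + (k0 : Int)) x = some me
  · rw [if_pos hfin, if_pos hfin]
    simp only [if_pos rfl]
    have hn : (1 : Int).toNat + (k0 - 1) + 1 = k0 + 1 := by omega
    rw [hn, flipUpA_eq_flipB]
    have hdesc : (List.range (k0 + 1)).map (fun (m : Nat) => y + 1 + (k0 : Int) - (m : Int))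
        = (List.range (k0 + 1)).map (fun (m : Nat) => (y + 1) + ((k0 + 1 : Nat) : Int) - 1 - (m : Int)) :=
      List.map_congr_left (fun m _ => by push_cast; ring)
    rw [hdesc, desc_eq_rev_asc, flipB_reverse]
    -- flipB over range (k0+1) = flipB over range k0 then a no-op write at the anchor
    have hsplit : (List.range (k0 + 1)).map (fun (m : Nat) => y + 1 + (m : Int))
        = (List.range k0).map (fun (m : Nat) => y + 1 + (m : Int)) ++ [y + 1 + (k0 : Int)] := by
      rw [List.range_succ, List.map_append]; simp
    rw [hsplit, flipB_append, flipB_cons, flipB_nil]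
    have hmfin : cellAt (flipB lst x me ((List.range k0).map (fun (m : Nat) => y + 1 + (m : Int)))) (y + 1 + (k0 : Int)) x = some me := by
      rcases cellAt_flipB_or x me ((List.range k0).map (fun (m : Nat) => y + 1 + (m : Int))) lst (y + 1 + (k0 : Int)) with h | h
      · rw [h]; exact hfin
      · exact h
    rw [setCell_self _ _ _ _ hmfin]
    simp
  · rw [if_neg hfin, if_neg hfin]
    simp

-- ===== VERDICT (by name: the statement is the Claim_ definition above) =====
theorem hantei_sita_spec : Claim_equal_hantei_sita := by
  intro y x lst turn flag _ hpre
  obtain ⟨h1, h2⟩ := hpre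
  show hantei_sita y x lst turn flag = hantei_sita_alt y x lst turn flag
  rw [hantei_sita, hantei_sita_alt]
  cases hc : cellAt lst y x with
  | none => simp [hc] at h1
  | some c =>
    cases hc1 : cellAt lst (y + 1) x with
    | none =>
      by_cases hsp : c = " "
      · obtain ⟨h3, _⟩ := h2 (hsp ▸ hc)
        simp [hc1] at h3
      · simp [hc, hc1, hsp]
    | some c1 =>
      by_cases hsp : c = " "
      · subst hsp
        obtain ⟨h3, h4⟩ := h2 hc
        by_cases ht : turn = 1
        · subst ht
          simp only [reduceIte] at h4
          by_cases ho : c1 = "X"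
          · subst ho
            simp only [hc, hc1, reduceIte, true_and]
            rw [branch_eq x y flag lst "O" "X" (by decide) hc1 (h4 hc1)]
          · simp [hc, hc1, ho]
        · simp only [if_neg ht] at h4
          by_cases ho : c1 = "O"
          · subst ho
            simp only [hc, hc1, if_neg ht, reduceIte, true_and]
            rw [branch_eq x y flag lst "X" "O" (by decide) hc1 (h4 hc1)]
          · simp [hc, hc1, ho, ht]
      · simp [hc, hc1, hsp]
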